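-- pv_equiv track=rewrite | github.com/calyx-servicios/custom-etilfarma | foreign_purchase_order/models/purchase_order.py | _get_invoices_list
-- ===== SOURCE A (Python) =====
-- def _get_invoices_list(invoice_list):
--     """ It returns the elements of the
--         list that are not repeated """
--     invoice_list_sorted = sorted(invoice_list)
--     string_list_invoice = ''
--     previous_item = ''
--     for invoice in invoice_list_sorted:
--         if invoice != previous_item:
--             string_list_invoice += invoice
--         previous_item = invoice
--
--     return string_list_invoice
-- ===== SOURCE B (Python) =====
-- def _get_invoices_list(invoice_list):
--     """ It returns the elements of the
--         list that are not repeated """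
--     return ''.join(sorted(set(invoice_list)))
-- ===== Notes on version B (the rewrite author's own statement) =====
-- stated objective: idiomatic
-- what changed: Deduplicates up front with a set and joins the sorted unique elements in one pass, replacing A's sort-then-adjacent-compare loop with a previous-item marker and string += accumulation.
import Mathlib
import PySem

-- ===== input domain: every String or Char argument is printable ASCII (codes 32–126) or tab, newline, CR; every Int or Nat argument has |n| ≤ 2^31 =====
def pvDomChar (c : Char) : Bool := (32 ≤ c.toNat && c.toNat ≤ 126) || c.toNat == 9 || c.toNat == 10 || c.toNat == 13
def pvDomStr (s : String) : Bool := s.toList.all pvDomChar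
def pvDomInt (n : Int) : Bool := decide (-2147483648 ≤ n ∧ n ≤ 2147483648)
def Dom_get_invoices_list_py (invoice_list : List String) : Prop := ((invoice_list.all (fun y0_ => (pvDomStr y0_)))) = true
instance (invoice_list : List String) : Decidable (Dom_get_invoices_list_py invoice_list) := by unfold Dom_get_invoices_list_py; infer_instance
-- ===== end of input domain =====

-- B deduplicates with a set before sorting and joins in one pass, replacing A's
-- adjacent-comparison loop with string accumulation (objective: idiomatic).


-- ===== PORT A =====
-- the running string `string_list_invoice` is carried as a List Char (Lean's own
-- String.append is kernel-opaque); the final String.ofList converts back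
def get_invoices_list_py (invoice_list : List String) : String :=
  let invoice_list_sorted := PySem.List.sorted invoice_list (fun x => x) false
  let res := invoice_list_sorted.foldl
    (fun (st : List Char × String) invoice =>
      (if invoice ≠ st.2 then st.1 ++ invoice.toList else st.1, invoice))
    ([], "")
  String.ofList res.1

-- ===== PORT B =====
def get_invoices_list_py_alt (invoice_list : List String) : String :=
  PySem.Str.join "" (PySem.List.sorted (PySem.Set.ofList invoice_list) (fun x => x) false)

-- ===== PRECONDITION & SPEC =====
def Spec_get_invoices_list_py (invoice_list : List String) (out : String) : Prop := out = get_invoices_list_py_alt invoice_list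
instance (invoice_list : List String) (out : String) : Decidable (Spec_get_invoices_list_py invoice_list out) := by unfold Spec_get_invoices_list_py; infer_instance

-- ===== CLAIM (what is proved, stated in full; the proofs are below) =====
def Claim_equal_get_invoices_list_py : Prop := ∀ (invoice_list : List String), Dom_get_invoices_list_py invoice_list → Spec_get_invoices_list_py invoice_list (get_invoices_list_py invoice_list)

-- ===== LEMMAS AND PROOFS =====

-- adjacent dedup with a previous marker, as performed by A's loop
def pvD : List String → String → List String
  | [], _ => []
  | x :: t, p => (if x = p then [] else [x]) ++ pvD t x

lemma pv_foldl_eq (L : List String) (acc : List Char) (p : String) :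
    (L.foldl (fun (st : List Char × String) invoice =>
        (if invoice ≠ st.2 then st.1 ++ invoice.toList else st.1, invoice)) (acc, p)).1
      = acc ++ ((pvD L p).map String.toList).flatten := by
  induction L generalizing acc p with
  | nil => simp [pvD]
  | cons x t ih =>
    simp only [List.foldl_cons]
    by_cases hxp : x = p
    · rw [if_neg (by simp [hxp]), ih]
      simp [pvD, hxp]
    · rw [if_pos hxp, ih]
      simp [pvD, hxp]

lemma pv_empty_le (s : String) : "" ≤ s := by
  by_contra h
  push_neg at h
  have := String.lt_iff_toList_lt.mp h
  simp at this

lemma pv_mem_of_mem_pvD {L : List String} {p y : String} (h : y ∈ pvD L p) : y ∈ L := by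
  induction L generalizing p with
  | nil => simp [pvD] at h
  | cons x t ih =>
    simp only [pvD, List.mem_append] at h
    rcases h with h | h
    · split at h <;> simp_all
    · exact List.mem_cons_of_mem _ (ih h)

lemma pv_lt_of_mem_pvD {L : List String} {p : String}
    (h : L.Pairwise (· ≤ ·)) (hp : ∀ y ∈ L, p ≤ y) :
    ∀ y ∈ pvD L p, p < y := by
  induction L generalizing p with
  | nil => simp [pvD]
  | cons x t ih =>
    intro y hy
    rcases List.pairwise_cons.mp h with ⟨hxall, ht⟩
    simp only [pvD, List.mem_append] at hy
    have hpx : p ≤ x := hp x (List.mem_cons_self)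
    rcases hy with hy | hy
    · split at hy
      · simp at hy
      · rename_i hne
        simp only [List.mem_singleton] at hy
        subst hy
        exact lt_of_le_of_ne hpx (fun e => hne e.symm)
    · exact lt_of_le_of_lt hpx (ih ht hxall y hy)

lemma pv_pairwise_pvD {L : List String} {p : String}
    (h : L.Pairwise (· ≤ ·)) (hp : ∀ y ∈ L, p ≤ y) :
    (pvD L p).Pairwise (· < ·) := by
  induction L generalizing p with
  | nil => simp [pvD]
  | cons x t ih =>
    rcases List.pairwise_cons.mp h with ⟨hxall, ht⟩
    have tail := ih ht hxall
    by_cases hxp : x = p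
    · simpa [pvD, hxp] using tail
    · simp only [pvD, if_neg hxp, List.singleton_append, List.pairwise_cons]
      exact ⟨pv_lt_of_mem_pvD ht hxall, tail⟩

lemma pv_mem_pvD_of_mem {L : List String} {p y : String} (hy : y ∈ L) (hne : y ≠ p) :
    y ∈ pvD L p := by
  induction L generalizing p with
  | nil => simp at hy
  | cons x t ih =>
    rcases List.mem_cons.mp hy with rfl | hyt
    · simp [pvD, fun e : y = p => hne e]
    · by_cases hyx : y = x
      · subst hyx; simp [pvD, fun e : y = p => hne e]
      · simp only [pvD, List.mem_append]
        exact Or.inr (ih hyt hyx)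

lemma pv_eq_of_pairwise_lt {l1 l2 : List String}
    (h1 : l1.Pairwise (· < ·)) (h2 : l2.Pairwise (· < ·))
    (hm : ∀ y, y ∈ l1 ↔ y ∈ l2) : l1 = l2 := by
  induction l1 generalizing l2 with
  | nil =>
    cases l2 with
    | nil => rfl
    | cons b t2 => exact absurd ((hm b).mpr List.mem_cons_self) (by simp)
  | cons a t1 ih =>
    cases l2 with
    | nil => exact absurd ((hm a).mp List.mem_cons_self) (by simp)
    | cons b t2 =>
      rcases List.pairwise_cons.mp h1 with ⟨ha, ht1⟩
      rcases List.pairwise_cons.mp h2 with ⟨hb, ht2⟩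
      have hab : a = b := by
        rcases List.mem_cons.mp ((hm a).mp List.mem_cons_self) with e | hat2
        · exact e
        · rcases List.mem_cons.mp ((hm b).mpr List.mem_cons_self) with e | hbt1
          · exact e.symm
          · exact absurd (lt_trans (ha b hbt1) (hb a hat2)) (lt_irrefl a)
      subst hab
      have : t1 = t2 := by
        refine ih ht1 ht2 (fun y => ⟨fun hy => ?_, fun hy => ?_⟩)
        · rcases List.mem_cons.mp ((hm y).mp (List.mem_cons_of_mem _ hy)) with e | h
          · exact absurd (e ▸ ha y hy) (lt_irrefl a)
          · exact h
        · rcases List.mem_cons.mp ((hm y).mpr (List.mem_cons_of_mem _ hy)) with e | h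
          · exact absurd (e ▸ hb y hy) (lt_irrefl a)
          · exact h
      rw [this]

lemma pv_flatten_filter (S : List String) :
    (((S.filter (fun y => y ≠ "")).map String.toList)).flatten
      = (S.map String.toList).flatten := by
  simp only [ne_eq, decide_not]
  induction S with
  | nil => rfl
  | cons x t ih =>
    by_cases hx : x = ""
    · subst hx; simpa using ih
    · simp only [List.filter_cons]
      rw [if_pos (by simpa using hx)]
      simp only [List.map_cons, List.flatten_cons, ih]

lemma pv_intercalate_nil (l : List (List Char)) :
    List.intercalate ([] : List Char) l = l.flatten := by
  induction l with
  | nil => rfl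
  | cons x t ih =>
    cases t with
    | nil => simp [List.intercalate]
    | cons y u =>
      simp only [List.intercalate] at ih ⊢
      simp [List.intersperse, List.flatten] at ih ⊢
      exact ih

-- ===== VERDICT (by name: the statement is the Claim_ definition above) =====
theorem get_invoices_list_py_spec : Claim_equal_get_invoices_list_py := by
  intro xs _
  unfold Spec_get_invoices_list_py get_invoices_list_py get_invoices_list_py_alt
  set L := PySem.List.sorted xs (fun x => x) false with hL
  set S := PySem.List.sorted (PySem.Set.ofList xs) (fun x => x) false with hS
  have hLpair : L.Pairwise (· ≤ ·) := PySem.List.sorted_pairwise xs (fun x => x)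
  have hSlt : S.Pairwise (· < ·) := PySem.List.sorted_ofList_pairwise_lt xs
  have hDeq : pvD L "" = S.filter (fun y => y ≠ "") := by
    refine pv_eq_of_pairwise_lt
      (pv_pairwise_pvD hLpair (fun y _ => pv_empty_le y))
      (List.Pairwise.filter _ hSlt) (fun y => ?_)
    constructor
    · intro hy
      have hyL : y ∈ L := pv_mem_of_mem_pvD hy
      have hne : y ≠ "" := by
        have := pv_lt_of_mem_pvD hLpair (fun y _ => pv_empty_le y) y hy
        exact fun e => absurd (e ▸ this) (lt_irrefl "")
      refine List.mem_filter.mpr ⟨?_, by simpa using hne⟩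
      rw [hS, PySem.List.mem_sorted, PySem.Set.mem_ofList]
      exact (PySem.List.mem_sorted xs _ false y).mp hyL
    · intro hy
      rcases List.mem_filter.mp hy with ⟨hyS, hne⟩
      have hyxs : y ∈ xs := by
        rw [hS, PySem.List.mem_sorted, PySem.Set.mem_ofList] at hyS; exact hyS
      exact pv_mem_pvD_of_mem ((PySem.List.mem_sorted xs _ false y).mpr hyxs) (by simpa using hne)
  have hjoin : (PySem.Str.join "" S).toList = (S.map String.toList).flatten := by
    rw [PySem.Str.toList_join]
    simpa [PySem.Chars.join] using pv_intercalate_nil (S.map String.toList)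
  calc String.ofList (L.foldl (fun (st : List Char × String) invoice =>
          (if invoice ≠ st.2 then st.1 ++ invoice.toList else st.1, invoice)) ([], "")).1
      = String.ofList (((pvD L "").map String.toList).flatten) := by
        rw [pv_foldl_eq]; rfl
    _ = String.ofList ((S.map String.toList).flatten) := by
        rw [hDeq, pv_flatten_filter]
    _ = PySem.Str.join "" S := by rw [← hjoin, String.ofList_toList]
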